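-- pv_equiv track=rewrite | github.com/hi-asamin/laplace-api | app/services/market.py | is_mutual_fund_symbol
-- ===== SOURCE A (Python) =====
-- JAPAN_MUTUAL_FUNDS = [
--     # eMAXIS Slimシリーズ（実際のファンドコード）
--     {"Symbol": "03311179", "Name": "eMAXIS Slim 米国株式 (S&P500)", "EnglishName": "eMAXIS Slim US Equity (S&P500)", "Market": "Japan", "Category": "海外株式", "Company": "三菱UFJ国際投信", "YahooCode": "03311179", "nav": 32850, "change": 188, "change_percent": 0.58},
--     {"Symbol": "0331418A", "Name": "eMAXIS Slim 全世界株式 (オール・カントリー)", "EnglishName": "eMAXIS Slim All World Equity (All Country)", "Market": "Japan", "Category": "海外株式", "Company": "三菱UFJ国際投信", "YahooCode": "0331418A", "nav": 27500, "change": 188, "change_percent": 0.69},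
--     {"Symbol": "03312174", "Name": "eMAXIS Slim 先進国株式インデックス", "EnglishName": "eMAXIS Slim Developed Markets Equity Index", "Market": "Japan", "Category": "海外株式", "Company": "三菱UFJ国際投信", "YahooCode": "03312174", "nav": 26890, "change": 145, "change_percent": 0.54},
--     {"Symbol": "03312175", "Name": "eMAXIS Slim 新興国株式インデックス", "EnglishName": "eMAXIS Slim Emerging Markets Equity Index", "Market": "Japan", "Category": "海外株式", "Company": "三菱UFJ国際投信", "YahooCode": "03312175", "nav": 21450, "change": 123, "change_percent": 0.58},
--     {"Symbol": "03312177", "Name": "eMAXIS Slim 国内株式（TOPIX）", "EnglishName": "eMAXIS Slim Japan Equity (TOPIX)", "Market": "Japan", "Category": "国内株式", "Company": "三菱UFJ国際投信", "YahooCode": "03312177", "nav": 17890, "change": 98, "change_percent": 0.55},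
--     {"Symbol": "03312176", "Name": "eMAXIS Slim 国内株式（日経平均）", "EnglishName": "eMAXIS Slim Japan Equity (Nikkei 225)", "Market": "Japan", "Category": "国内株式", "Company": "三菱UFJ国際投信", "YahooCode": "03312176", "nav": 19340, "change": 112, "change_percent": 0.58},
--
--     # SBI・Vシリーズ（実際のファンドコード）
--     {"Symbol": "2020012A", "Name": "SBI・V・S&P500インデックス・ファンド", "EnglishName": "SBI V S&P500 Index Fund", "Market": "Japan", "Category": "海外株式", "Company": "SBIアセットマネジメント", "YahooCode": "2020012A", "nav": 22340, "change": 127, "change_percent": 0.57},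
--     {"Symbol": "2020011A", "Name": "SBI・V・全米株式インデックス・ファンド", "EnglishName": "SBI V US Total Stock Market Index Fund", "Market": "Japan", "Category": "海外株式", "Company": "SBIアセットマネジメント", "YahooCode": "2020011A", "nav": 18920, "change": 108, "change_percent": 0.57},
--     {"Symbol": "2020013A", "Name": "SBI・V・全世界株式インデックス・ファンド", "EnglishName": "SBI V Total World Stock Index Fund", "Market": "Japan", "Category": "海外株式", "Company": "SBIアセットマネジメント", "YahooCode": "2020013A", "nav": 19680, "change": 112, "change_percent": 0.57},
--
--     # 楽天シリーズ（実際のファンドコード）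
--     {"Symbol": "01311187", "Name": "楽天・全米株式インデックス・ファンド", "EnglishName": "Rakuten All America Stock Index Fund", "Market": "Japan", "Category": "海外株式", "Company": "楽天投信投資顧問", "YahooCode": "01311187", "nav": 27890, "change": 159, "change_percent": 0.57},
--     {"Symbol": "01311188", "Name": "楽天・全世界株式インデックス・ファンド", "EnglishName": "Rakuten All World Stock Index Fund", "Market": "Japan", "Category": "海外株式", "Company": "楽天投信投資顧問", "YahooCode": "01311188", "nav": 20250, "change": 115, "change_percent": 0.57},
--
--     # ニッセイシリーズ（実際のファンドコード）
--     {"Symbol": "03131113", "Name": "ニッセイ外国株式インデックスファンド", "EnglishName": "Nissei Foreign Stock Index Fund", "Market": "Japan", "Category": "海外株式", "Company": "ニッセイアセットマネジメント", "YahooCode": "03131113", "nav": 31240, "change": 168, "change_percent": 0.54},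
--     {"Symbol": "03131114", "Name": "ニッセイTOPIXインデックスファンド", "EnglishName": "Nissei TOPIX Index Fund", "Market": "Japan", "Category": "国内株式", "Company": "ニッセイアセットマネジメント", "YahooCode": "03131114", "nav": 16780, "change": 89, "change_percent": 0.53},
--
--     # その他人気ファンド（実際のファンドコード）
--     {"Symbol": "09311173", "Name": "セゾン・バンガード・グローバルバランスファンド", "EnglishName": "Saison Vanguard Global Balanced Fund", "Market": "Japan", "Category": "バランス型", "Company": "セゾン投信", "YahooCode": "09311173", "nav": 18450, "change": 78, "change_percent": 0.42},
--     {"Symbol": "04311140", "Name": "iFree S&P500インデックス", "EnglishName": "iFree S&P500 Index", "Market": "Japan", "Category": "海外株式", "Company": "大和アセットマネジメント", "YahooCode": "04311140", "nav": 24680, "change": 141, "change_percent": 0.57},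
--     {"Symbol": "03312181", "Name": "つみたて日本株式（日経平均）", "EnglishName": "Tsumitate Japan Stock (Nikkei 225)", "Market": "Japan", "Category": "国内株式", "Company": "三菱UFJ国際投信", "YahooCode": "03312181", "nav": 17990, "change": 103, "change_percent": 0.58},
-- ]
--
-- def is_mutual_fund_symbol(symbol: str) -> bool:
--     """
--     シンボルが投資信託かどうかを判別する関数
--
--     Args:
--         symbol: 銘柄シンボル
--
--     Returns:
--         bool: 投資信託の場合True
--     """
--     # 定義済み投資信託シンボル（実際のファンドコード）
--     mutual_fund_symbols = {fund['Symbol'] for fund in JAPAN_MUTUAL_FUNDS}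
--     if symbol in mutual_fund_symbols:
--         return True
--
--     # 日本の投資信託ファンドコードのパターン判定
--     # 8桁の英数字（例：0331418A）
--     if len(symbol) == 8 and symbol.isalnum():
--         return True
--
--     # 従来の.MFサフィックス（下位互換性のため）
--     if symbol.endswith('.MF'):
--         return True
--
--     return False
-- ===== SOURCE B (Python) =====
-- def is_mutual_fund_symbol(symbol: str) -> bool:
--     # Every listed fund code is itself an 8-char alphanumeric string, so the
--     # table lookup is redundant: a pure pattern test suffices.
--     return (len(symbol) == 8 and symbol.isalnum()) or symbol.endswith('.MF')
-- ===== Notes on version B (the rewrite author's own statement) =====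
-- stated objective: simpler
-- what changed: B drops the fund-table set entirely: since every Symbol in JAPAN_MUTUAL_FUNDS is an 8-character alphanumeric string, membership is subsumed by the pattern test, so B is a single boolean expression with no set construction or lookup.
import Mathlib
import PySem

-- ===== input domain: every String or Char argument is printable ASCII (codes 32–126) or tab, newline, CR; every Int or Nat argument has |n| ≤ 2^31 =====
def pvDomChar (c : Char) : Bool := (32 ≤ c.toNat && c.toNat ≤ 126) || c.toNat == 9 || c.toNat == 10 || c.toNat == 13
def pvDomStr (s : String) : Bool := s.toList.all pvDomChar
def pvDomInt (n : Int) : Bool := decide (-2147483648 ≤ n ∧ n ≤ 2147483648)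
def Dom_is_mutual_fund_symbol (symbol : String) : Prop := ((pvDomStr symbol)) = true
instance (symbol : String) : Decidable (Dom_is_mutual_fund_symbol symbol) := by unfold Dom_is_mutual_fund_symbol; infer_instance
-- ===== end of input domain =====

-- B drops the redundant fund-table lookup (every listed Symbol is 8-char alphanumeric),
-- leaving a single pattern test; objective: simpler.

-- ===== PORT A =====
-- JAPAN_MUTUAL_FUNDS, restricted to its string-valued fields read by the function
-- ("Symbol"; "YahooCode" kept as a second representative): the numeric/float fields and the
-- Japanese-text fields are never read by is_mutual_fund_symbol, so the port is exact for it.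
def japanMutualFunds : List (PySem.Dict String String) :=
  [PySem.Dict.mk [("Symbol", "03311179"), ("YahooCode", "03311179")],
   PySem.Dict.mk [("Symbol", "0331418A"), ("YahooCode", "0331418A")],
   PySem.Dict.mk [("Symbol", "03312174"), ("YahooCode", "03312174")],
   PySem.Dict.mk [("Symbol", "03312175"), ("YahooCode", "03312175")],
   PySem.Dict.mk [("Symbol", "03312177"), ("YahooCode", "03312177")],
   PySem.Dict.mk [("Symbol", "03312176"), ("YahooCode", "03312176")],
   PySem.Dict.mk [("Symbol", "2020012A"), ("YahooCode", "2020012A")],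
   PySem.Dict.mk [("Symbol", "2020011A"), ("YahooCode", "2020011A")],
   PySem.Dict.mk [("Symbol", "2020013A"), ("YahooCode", "2020013A")],
   PySem.Dict.mk [("Symbol", "01311187"), ("YahooCode", "01311187")],
   PySem.Dict.mk [("Symbol", "01311188"), ("YahooCode", "01311188")],
   PySem.Dict.mk [("Symbol", "03131113"), ("YahooCode", "03131113")],
   PySem.Dict.mk [("Symbol", "03131114"), ("YahooCode", "03131114")],
   PySem.Dict.mk [("Symbol", "09311173"), ("YahooCode", "09311173")],
   PySem.Dict.mk [("Symbol", "04311140"), ("YahooCode", "04311140")],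
   PySem.Dict.mk [("Symbol", "03312181"), ("YahooCode", "03312181")]]

def is_mutual_fund_symbol (symbol : String) : Bool :=
  -- mutual_fund_symbols = {fund['Symbol'] for fund in JAPAN_MUTUAL_FUNDS}
  -- (fund['Symbol'] always present, so getD never takes its default)
  let mutual_fund_symbols : PySem.Set String :=
    PySem.Set.ofList (japanMutualFunds.map (fun fund => fund.getD "Symbol" ""))
  if PySem.Set.contains mutual_fund_symbols symbol then true
  else if PySem.Str.len symbol == 8 && PySem.Str.strIsalnum symbol then true
  else if PySem.Str.endswith symbol ".MF" then true
  else false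

-- ===== PORT B =====
def is_mutual_fund_symbol_alt (symbol : String) : Bool :=
  (PySem.Str.len symbol == 8 && PySem.Str.strIsalnum symbol) || PySem.Str.endswith symbol ".MF"

-- ===== PRECONDITION & SPEC =====
def Spec_is_mutual_fund_symbol (symbol : String) (out : Bool) : Prop := out = is_mutual_fund_symbol_alt symbol
instance (symbol : String) (out : Bool) : Decidable (Spec_is_mutual_fund_symbol symbol out) := by unfold Spec_is_mutual_fund_symbol; infer_instance

-- ===== CLAIM (what is proved, stated in full; the proofs are below) =====
def Claim_equal_is_mutual_fund_symbol : Prop := ∀ (symbol : String), Dom_is_mutual_fund_symbol symbol → Spec_is_mutual_fund_symbol symbol (is_mutual_fund_symbol symbol)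

-- ===== LEMMAS AND PROOFS =====

-- every symbol in the table passes B's 8-char-alnum test
theorem table_member_pattern (symbol : String)
    (h : PySem.Set.contains
      (PySem.Set.ofList (japanMutualFunds.map (fun fund => fund.getD "Symbol" ""))) symbol = true) :
    (PySem.Str.len symbol == 8 && PySem.Str.strIsalnum symbol) = true := by
  rw [PySem.Set.contains_iff] at h
  have h' : symbol ∈ (["03311179", "0331418A", "03312174", "03312175", "03312177",
      "03312176", "2020012A", "2020011A", "2020013A", "01311187", "01311188",
      "03131113", "03131114", "09311173", "04311140", "03312181"] : List String) := by
    have e : PySem.Set.ofList (japanMutualFunds.map (fun fund => fund.getD "Symbol" ""))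
        = ["03311179", "0331418A", "03312174", "03312175", "03312177",
           "03312176", "2020012A", "2020011A", "2020013A", "01311187", "01311188",
           "03131113", "03131114", "09311173", "04311140", "03312181"] := by decide
    rwa [e] at h
  simp only [List.mem_cons, List.not_mem_nil, or_false] at h'
  rcases h' with h' | h' | h' | h' | h' | h' | h' | h' | h' | h' | h' | h' | h' | h' | h' | h' <;>
    subst h' <;> decide

-- ===== VERDICT (by name: the statement is the Claim_ definition above) =====
theorem is_mutual_fund_symbol_spec : Claim_equal_is_mutual_fund_symbol := by
  intro symbol _
  unfold Spec_is_mutual_fund_symbol is_mutual_fund_symbol is_mutual_fund_symbol_alt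
  by_cases h : PySem.Set.contains
      (PySem.Set.ofList (japanMutualFunds.map (fun fund => fund.getD "Symbol" ""))) symbol = true
  · rw [if_pos h]
    have hp := table_member_pattern symbol h
    rw [hp, Bool.true_or]
  · rw [if_neg h]
    split_ifs with h8 hmf <;> simp_all
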